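-- pv_equiv track=rewrite | github.com/sikaneta/avoc | 2024_day22.py | seqHist
-- ===== SOURCE A (Python) =====
-- from collections import defaultdict
--
-- def seqHist(seq):
--     myhist = defaultdict(list)
--     N = len(seq)
--     for k in range(4,N):
--         key = (seq[k-3] - seq[k-4],
--                seq[k-2] - seq[k-3],
--                seq[k-1] - seq[k-2],
--                seq[k] - seq[k-1])
--         myhist[key].append(seq[k])
--     return myhist
-- ===== SOURCE B (Python) =====
-- from collections import defaultdict
--
-- def _hist(rows):
--     # divide and conquer: histogram of each half, then merge the right half's
--     # buckets into the left's (new keys append in first-occurrence order)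
--     if len(rows) <= 1:
--         h = defaultdict(list)
--         for k, v in rows:
--             h[k].append(v)
--         return h
--     mid = len(rows) // 2
--     left = _hist(rows[:mid])
--     right = _hist(rows[mid:])
--     for k, vs in right.items():
--         left[k].extend(vs)
--     return left
--
-- def seqHist(seq):
--     rows = [((b - a, c - b, d - c, e - d), e)
--             for a, b, c, d, e in zip(seq, seq[1:], seq[2:], seq[3:], seq[4:])]
--     return _hist(rows)
-- ===== Notes on version B (the rewrite author's own statement) =====
-- stated objective: alternative
-- what changed: Replaces A's single left-to-right dict accumulation by divide and conquer: the (difference-tuple, value) row stream is split in half, each half's histogram is built recursively, and the right histogram's buckets are merged into the left's.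
import Mathlib
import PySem

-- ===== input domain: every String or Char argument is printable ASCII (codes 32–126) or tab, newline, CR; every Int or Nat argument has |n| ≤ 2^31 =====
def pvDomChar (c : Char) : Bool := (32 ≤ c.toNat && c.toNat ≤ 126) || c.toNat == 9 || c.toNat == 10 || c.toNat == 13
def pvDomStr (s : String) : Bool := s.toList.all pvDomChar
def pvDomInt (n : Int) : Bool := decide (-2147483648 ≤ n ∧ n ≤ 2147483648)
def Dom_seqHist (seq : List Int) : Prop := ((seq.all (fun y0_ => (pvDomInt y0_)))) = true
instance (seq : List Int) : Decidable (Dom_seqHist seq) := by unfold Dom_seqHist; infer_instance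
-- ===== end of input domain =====

-- B builds the histogram by divide and conquer — histogram each half of the row stream,
-- then merge the right half's buckets into the left's — instead of A's single left-to-right
-- dict accumulation (alternative algorithm; not faster).


-- shared: render a Dict keyed by a 4-tuple as the flattened items list (type convention)
def pvRender (d : PySem.Dict (Int × Int × Int × Int) (List Int)) :
    List (Int × Int × Int × Int × List Int) :=
  d.items.map (fun p => (p.1.1, p.1.2.1, p.1.2.2.1, p.1.2.2.2, p.2))

-- ===== PORT A =====
-- indices k-4..k are always in range for k ∈ range(4, N), so pyGetD with default 0 is exact
def seqHist (seq : List Int) : List (Int × Int × Int × Int × List Int) :=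
  let N : Int := seq.length
  let d := (PySem.List.pyRange 4 N 1).foldl
    (fun d k =>
      let key : Int × Int × Int × Int :=
        (PySem.List.pyGetD seq (k-3) 0 - PySem.List.pyGetD seq (k-4) 0,
         PySem.List.pyGetD seq (k-2) 0 - PySem.List.pyGetD seq (k-3) 0,
         PySem.List.pyGetD seq (k-1) 0 - PySem.List.pyGetD seq (k-2) 0,
         PySem.List.pyGetD seq k 0 - PySem.List.pyGetD seq (k-1) 0)
      d.modify key [] (· ++ [PySem.List.pyGetD seq k 0]))
    PySem.Dict.empty
  pvRender d

-- ===== PORT B =====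
-- _hist: rows[:mid]/rows[mid:] are nonnegative-bound slices = take/drop; len//2 on a
-- nonnegative length is Nat division; right.items is Python's right.items() in order
def pvHist (rows : List ((Int × Int × Int × Int) × Int)) :
    PySem.Dict (Int × Int × Int × Int) (List Int) :=
  if _h : rows.length ≤ 1 then
    rows.foldl (fun h r => h.modify r.1 [] (· ++ [r.2])) PySem.Dict.empty
  else
    let mid := rows.length / 2
    let left := pvHist (rows.take mid)
    let right := pvHist (rows.drop mid)
    right.items.foldl (fun d p => d.modify p.1 [] (· ++ p.2)) left
termination_by rows.length
decreasing_by
  · simp; omega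
  · simp; omega

-- seq[1:] … are nonnegative-start slices, exactly List.drop; the five-way zip nests left
def seqHist_alt (seq : List Int) : List (Int × Int × Int × Int × List Int) :=
  let rows := ((((seq.zip (seq.drop 1)).zip (seq.drop 2)).zip (seq.drop 3)).zip (seq.drop 4)).map
    (fun r => ((r.1.1.1.2 - r.1.1.1.1, r.1.1.2 - r.1.1.1.2, r.1.2 - r.1.1.2, r.2 - r.1.2), r.2))
  pvRender (pvHist rows)

-- ===== PRECONDITION & SPEC =====
def Spec_seqHist (seq : List Int) (out : List (Int × Int × Int × Int × List Int)) : Prop := out = seqHist_alt seq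
instance (seq : List Int) (out : List (Int × Int × Int × Int × List Int)) : Decidable (Spec_seqHist seq out) := by unfold Spec_seqHist; infer_instance

-- ===== CLAIM (what is proved, stated in full; the proofs are below) =====
def Claim_equal_seqHist : Prop := ∀ (seq : List Int), Dom_seqHist seq → Spec_seqHist seq (seqHist seq)

-- ===== LEMMAS AND PROOFS =====

-- A's stream of (key, value) pairs
def pvRowsA (seq : List Int) : List ((Int × Int × Int × Int) × Int) :=
  (PySem.List.pyRange 4 (seq.length : Int) 1).map (fun k =>
    ((PySem.List.pyGetD seq (k-3) 0 - PySem.List.pyGetD seq (k-4) 0,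
      PySem.List.pyGetD seq (k-2) 0 - PySem.List.pyGetD seq (k-3) 0,
      PySem.List.pyGetD seq (k-1) 0 - PySem.List.pyGetD seq (k-2) 0,
      PySem.List.pyGetD seq k 0 - PySem.List.pyGetD seq (k-1) 0),
     PySem.List.pyGetD seq k 0))

-- B's stream of (key, value) pairs
def pvRowsB (seq : List Int) : List ((Int × Int × Int × Int) × Int) :=
  ((((seq.zip (seq.drop 1)).zip (seq.drop 2)).zip (seq.drop 3)).zip (seq.drop 4)).map
    (fun r => ((r.1.1.1.2 - r.1.1.1.1, r.1.1.2 - r.1.1.1.2, r.1.2 - r.1.1.2, r.2 - r.1.2), r.2))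

theorem rowsA_eq_rowsB (seq : List Int) : pvRowsA seq = pvRowsB seq := by
  apply List.ext_getElem
  · simp [pvRowsA, pvRowsB, PySem.List.length_pyRange_one]; omega
  · intro i h1 h2
    have hlen : i + 4 < seq.length := by
      simp [pvRowsA, PySem.List.length_pyRange_one] at h1; omega
    simp only [pvRowsA, pvRowsB, List.getElem_map, List.getElem_zip, List.getElem_drop,
      PySem.List.getElem_pyRange_one]
    have e1 : (4:Int) + (i:Int) - 3 = ((i+1 : Nat) : Int) := by push_cast; ring
    have e2 : (4:Int) + (i:Int) - 4 = ((i : Nat) : Int) := by ring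
    have e3 : (4:Int) + (i:Int) - 2 = ((i+2 : Nat) : Int) := by push_cast; ring
    have e4 : (4:Int) + (i:Int) - 1 = ((i+3 : Nat) : Int) := by push_cast; ring
    have e5 : (4:Int) + (i:Int) = ((i+4 : Nat) : Int) := by push_cast; ring
    rw [e1, e2, e3, e4, e5]
    simp only [PySem.List.pyGetD_natCast]
    rw [List.getD_eq_getElem _ _ (by omega), List.getD_eq_getElem _ _ (by omega),
        List.getD_eq_getElem _ _ (by omega), List.getD_eq_getElem _ _ (by omega),
        List.getD_eq_getElem _ _ (by omega)]
    rw [getElem_congr_idx (show 1 + i = i + 1 by omega),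
        getElem_congr_idx (show 2 + i = i + 2 by omega),
        getElem_congr_idx (show 3 + i = i + 3 by omega),
        getElem_congr_idx (show 4 + i = i + 4 by omega)]

-- getD through B's merge loop (appends whole bucket lists)
theorem getD_mergeFold (l : List ((Int × Int × Int × Int) × List Int))
    (d : PySem.Dict (Int × Int × Int × Int) (List Int)) (k : Int × Int × Int × Int) :
    (l.foldl (fun d p => d.modify p.1 [] (· ++ p.2)) d).getD k []
      = d.getD k [] ++ ((l.filter (fun p => p.1 == k)).map (·.2)).flatten := by
  induction l generalizing d with
  | nil => simp
  | cons p l ih =>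
    simp only [List.foldl_cons, ih, List.filter_cons]
    by_cases hk : p.1 = k
    · subst hk; simp [PySem.Dict.getD_modify_self]
    · have hk' : ¬ k = p.1 := fun e => hk e.symm
      have : (p.1 == k) = false := by simp [hk]
      simp [this, PySem.Dict.getD_modify, hk']

-- flattening the matching entries of an association list with distinct keys picks the bucket
theorem flatten_filter_map_keys (k : Int × Int × Int × Int) (ks : List (Int × Int × Int × Int))
    (f : (Int × Int × Int × Int) → List Int) (hnd : ks.Nodup) :
    ((((ks.map (fun k' => (k', f k'))).filter (fun p => p.1 == k)).map (·.2)).flatten)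
      = if k ∈ ks then f k else [] := by
  induction ks with
  | nil => simp
  | cons a ks ih =>
    have hnd' := hnd
    simp only [List.nodup_cons] at hnd'
    simp only [List.map_cons, List.filter_cons]
    by_cases ha : a = k
    · subst ha
      have hmem : a ∉ ks := hnd'.1
      simp [ih hnd'.2, hmem]
    · have : (a == k) = false := by simp [ha]
      simp only [this, Bool.false_eq_true, if_false, ih hnd'.2, List.mem_cons]
      have hiff : (k = a ∨ k ∈ ks) ↔ k ∈ ks :=
        ⟨fun h => h.elim (fun e => absurd e.symm ha) id, Or.inr⟩
      simp [hiff]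

-- the matching items of a nodup-keyed dict, flattened, are its bucket
theorem flatten_filter_items (h : PySem.Dict (Int × Int × Int × Int) (List Int))
    (hnd : h.keys.Nodup) (k : Int × Int × Int × Int) :
    (((h.items.filter (fun p => p.1 == k)).map (·.2)).flatten) = h.getD k [] := by
  rw [PySem.Dict.items_eq_map_keys h hnd ([] : List Int),
      flatten_filter_map_keys k h.keys (fun k' => h.getD k' []) hnd]
  by_cases hk : k ∈ h.keys
  · rw [if_pos hk]
  · rw [if_neg hk]
    exact (PySem.Dict.getD_of_not_contains h ([] : List Int)
      (by rw [PySem.Dict.contains_eq_decide_mem_keys]; simp [hk])).symm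

-- merging the histogram of ys into d is the same dict as folding ys into d directly
theorem merge_eq_foldl (ys : List ((Int × Int × Int × Int) × Int))
    (d : PySem.Dict (Int × Int × Int × Int) (List Int)) (hd : d.keys.Nodup) :
    ((ys.foldl (fun (h : PySem.Dict (Int × Int × Int × Int) (List Int))
          (r : (Int × Int × Int × Int) × Int) => h.modify r.1 [] (· ++ [r.2]))
        PySem.Dict.empty).items).foldl
        (fun d p => d.modify p.1 [] (· ++ p.2)) d
      = ys.foldl (fun h r => h.modify r.1 [] (· ++ [r.2])) d := by
  set h := ys.foldl (fun (h : PySem.Dict (Int × Int × Int × Int) (List Int))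
      (r : (Int × Int × Int × Int) × Int) => h.modify r.1 [] (· ++ [r.2]))
    PySem.Dict.empty with hh
  have hndh : h.keys.Nodup := by
    rw [hh]
    exact PySem.Dict.nodup_keys_foldl_modify_key ys (·.1) [] (fun _ r => (· ++ [r.2])) _
      PySem.Dict.nodup_keys_empty
  have hndL : (h.items.foldl (fun d p => d.modify p.1 [] (· ++ p.2)) d).keys.Nodup :=
    PySem.Dict.nodup_keys_foldl_modify_key h.items (·.1) [] (fun _ p => (· ++ p.2)) d hd
  have hndR : (ys.foldl (fun h r => h.modify r.1 [] (· ++ [r.2])) d).keys.Nodup :=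
    PySem.Dict.nodup_keys_foldl_modify_key ys (·.1) [] (fun _ r => (· ++ [r.2])) d hd
  -- keys agree
  have hkeysh : h.keys = PySem.Set.ofList (ys.map (·.1)) := by
    rw [hh, PySem.Dict.keys_foldl_modify_key]
    simp [PySem.Set.update_nil_left]
  have hkeys : (h.items.foldl (fun d p => d.modify p.1 [] (· ++ p.2)) d).keys
      = (ys.foldl (fun h r => h.modify r.1 [] (· ++ [r.2])) d).keys := by
    rw [PySem.Dict.keys_foldl_modify_key, PySem.Dict.keys_foldl_modify_key]
    have : h.items.map (·.1) = h.keys := rfl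
    rw [this, hkeysh, PySem.Set.update_eq_append_filter, PySem.Set.update_eq_append_filter,
        PySem.Set.ofList_ofList]
  -- getD agrees everywhere
  have hgetD : ∀ k, (h.items.foldl (fun d p => d.modify p.1 [] (· ++ p.2)) d).getD k []
      = (ys.foldl (fun h r => h.modify r.1 [] (· ++ [r.2])) d).getD k [] := by
    intro k
    rw [getD_mergeFold, flatten_filter_items h hndh, hh,
        PySem.Dict.getD_foldl_modify_append, PySem.Dict.getD_foldl_modify_append]
    simp
  apply PySem.Dict.ext
  rw [PySem.Dict.items_eq_map_keys _ hndL ([] : List Int),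
      PySem.Dict.items_eq_map_keys _ hndR ([] : List Int), hkeys]
  exact List.map_congr_left (fun k _ => by rw [hgetD k])

-- the divide-and-conquer histogram equals the left-to-right fold
theorem pvHist_eq (rows : List ((Int × Int × Int × Int) × Int)) :
    pvHist rows = rows.foldl (fun h r => h.modify r.1 [] (· ++ [r.2])) PySem.Dict.empty := by
  have key : ∀ n rows₀, List.length rows₀ ≤ n →
      pvHist rows₀ = rows₀.foldl (fun h r => h.modify r.1 [] (· ++ [r.2])) PySem.Dict.empty := by
    intro n
    induction n with
    | zero =>
      intro rows₀ hl
      rw [pvHist, dif_pos (by omega)]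
    | succ n ih =>
      intro rows₀ hl
      rw [pvHist]
      by_cases hlen : rows₀.length ≤ 1
      · rw [dif_pos hlen]
      · rw [dif_neg hlen]
        show ((pvHist (rows₀.drop (rows₀.length / 2))).items).foldl
            (fun d p => d.modify p.1 [] (· ++ p.2))
            (pvHist (rows₀.take (rows₀.length / 2))) = _
        have hnd0 : ((rows₀.take (rows₀.length / 2)).foldl
            (fun h r => h.modify r.1 [] (· ++ [r.2])) PySem.Dict.empty).keys.Nodup :=
          PySem.Dict.nodup_keys_foldl_modify_key (rows₀.take (rows₀.length / 2))
            (fun (r : (Int × Int × Int × Int) × Int) => r.1) ([] : List Int)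
            (fun _ r => (· ++ [r.2])) PySem.Dict.empty PySem.Dict.nodup_keys_empty
        rw [ih (rows₀.take (rows₀.length / 2)) (by simp; omega),
            ih (rows₀.drop (rows₀.length / 2)) (by simp; omega),
            merge_eq_foldl _ _ hnd0,
            ← List.foldl_append, List.take_append_drop]
  exact key rows.length rows le_rfl

-- unfold the two ports to their row-stream forms
theorem seqHist_eq (seq : List Int) :
    seqHist seq = pvRender ((pvRowsA seq).foldl
      (fun d r => d.modify r.1 [] (· ++ [r.2])) PySem.Dict.empty) := by
  simp [seqHist, pvRowsA, List.foldl_map]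

theorem seqHist_alt_eq (seq : List Int) :
    seqHist_alt seq = pvRender ((pvRowsB seq).foldl
      (fun d r => d.modify r.1 [] (· ++ [r.2])) PySem.Dict.empty) := by
  simp [seqHist_alt, pvRowsB, pvHist_eq]

-- ===== VERDICT (by name: the statement is the Claim_ definition above) =====
theorem seqHist_spec : Claim_equal_seqHist := by
  intro seq _
  unfold Spec_seqHist
  rw [seqHist_eq, seqHist_alt_eq, rowsA_eq_rowsB]
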